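-- pv_equiv track=rewrite | github.com/Aarogaming/Workbench | scripts/check_attestation_preflight_wiring.py | check_workflow_content
-- ===== SOURCE A (Python) =====
-- REQUIRED_STEP = "GH CLI minimum version preflight"
--
-- REQUIRED_IF = "if: ${{ github.event.repository.private == false }}"
--
-- REQUIRED_TOKENS: tuple[str, ...] = (
--     "scripts/check_gh_cli_version.py",
--     "--min-version 2.50.0",
-- )
--
-- def _step_line_indexes(lines: list[str], step_name: str) -> list[int]:
--     needle = f"- name: {step_name}"
--     return [idx for idx, line in enumerate(lines) if line.strip() == needle]
--
-- def _step_blocks(lines: list[str], step_name: str) -> list[list[str]]: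
--     indexes = _step_line_indexes(lines, step_name)
--     name_indexes = [
--         idx for idx, line in enumerate(lines) if line.lstrip().startswith("- name:")
--     ]
--     blocks: list[list[str]] = []
--     for idx in indexes:
--         next_indexes = [value for value in name_indexes if value > idx]
--         end = next_indexes[0] if next_indexes else len(lines)
--         blocks.append(lines[idx:end])
--     return blocks
--
-- def check_workflow_content(content: str, workflow_label: str) -> list[str]:
--     issues: list[str] = []
--     lines = content.splitlines()
--     blocks = _step_blocks(lines, REQUIRED_STEP)
--     if not blocks:
--         return [f"{workflow_label}: missing step '{REQUIRED_STEP}'"]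
--
--     if not any(any(REQUIRED_IF in line for line in block) for block in blocks):
--         issues.append(f"{workflow_label}: step '{REQUIRED_STEP}' missing expected condition")
--
--     for token in REQUIRED_TOKENS:
--         if not any(any(token in line for line in block) for block in blocks):
--             issues.append(
--                 f"{workflow_label}: step '{REQUIRED_STEP}' missing expected token '{token}'"
--             )
--
--     return issues
-- ===== SOURCE B (Python) =====
-- REQUIRED_STEP = "GH CLI minimum version preflight"
--
-- REQUIRED_IF = "if: ${{ github.event.repository.private == false }}"
--
-- REQUIRED_TOKENS: tuple[str, ...] = (
--     "scripts/check_gh_cli_version.py",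
--     "--min-version 2.50.0",
-- )
--
--
-- def check_workflow_content(content: str, workflow_label: str) -> list[str]:
--     # Single forward pass over the lines, tracking whether we are inside a
--     # required-step block and accumulating one flag per required feature.
--     found = False
--     in_block = False
--     has_if = False
--     tok_found = [False for _ in REQUIRED_TOKENS]
--     for line in content.splitlines():
--         if line.lstrip().startswith("- name:"):
--             in_block = line.strip() == f"- name: {REQUIRED_STEP}"
--             found = found or in_block
--         if in_block:
--             has_if = has_if or (REQUIRED_IF in line)
--             tok_found = [f or (t in line) for f, t in zip(tok_found, REQUIRED_TOKENS)]
--     if not found: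
--         return [f"{workflow_label}: missing step '{REQUIRED_STEP}'"]
--     issues: list[str] = []
--     if not has_if:
--         issues.append(f"{workflow_label}: step '{REQUIRED_STEP}' missing expected condition")
--     for f, t in zip(tok_found, REQUIRED_TOKENS):
--         if not f:
--             issues.append(
--                 f"{workflow_label}: step '{REQUIRED_STEP}' missing expected token '{t}'"
--             )
--     return issues
-- ===== Notes on version B (the rewrite author's own statement) =====
-- stated objective: alternative
-- what changed: Replaces the index-list/slice block extraction (enumerate the lines twice, then for each matching step rescan the name-index list and slice out its block) with a single forward pass over the lines maintaining an in_block state and one boolean flag per required feature.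
import Mathlib
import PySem

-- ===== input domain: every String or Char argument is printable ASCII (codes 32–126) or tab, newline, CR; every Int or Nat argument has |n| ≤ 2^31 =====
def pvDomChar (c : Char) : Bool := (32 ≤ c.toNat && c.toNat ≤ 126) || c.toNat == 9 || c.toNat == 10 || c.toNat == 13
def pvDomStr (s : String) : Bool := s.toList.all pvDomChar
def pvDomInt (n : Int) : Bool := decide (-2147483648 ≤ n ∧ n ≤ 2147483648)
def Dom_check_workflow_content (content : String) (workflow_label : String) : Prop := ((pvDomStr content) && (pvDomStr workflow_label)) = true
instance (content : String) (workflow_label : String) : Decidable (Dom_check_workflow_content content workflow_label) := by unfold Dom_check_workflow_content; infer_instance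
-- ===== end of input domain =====

-- B replaces A's two enumerate passes plus per-match rescan/slice block extraction with one
-- forward pass over the lines maintaining an in-block state and one flag per requirement.

-- ===== PORT A =====
def REQUIRED_STEP : String := "GH CLI minimum version preflight"
def REQUIRED_IF : String := "if: ${{ github.event.repository.private == false }}"
def REQUIRED_TOKENS : List String := ["scripts/check_gh_cli_version.py", "--min-version 2.50.0"]

def pvStepLineIndexes (lines : List String) (step_name : String) : List Int :=
  ((PySem.List.enumerate lines).filter
      (fun p => PySem.Str.strip p.2 == ("- name: " ++ step_name))).map (fun p => p.1)

def pvStepBlocks (lines : List String) (step_name : String) : List (List String) :=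
  let indexes := pvStepLineIndexes lines step_name
  let name_indexes := ((PySem.List.enumerate lines).filter
      (fun p => PySem.Str.startswith (PySem.Str.lstrip p.2) "- name:")).map (fun p => p.1)
  indexes.foldl (fun blocks idx =>
    let next_indexes := name_indexes.filter (fun v => idx < v)
    let e : Int := match next_indexes with
      | [] => (lines.length : Int)
      | v :: _ => v
    blocks ++ [PySem.List.slice lines (some idx) (some e)]) []

def check_workflow_content (content : String) (workflow_label : String) : List String :=
  let issues : List String := []
  let lines := PySem.Str.splitlines content
  let blocks := pvStepBlocks lines REQUIRED_STEP
  if blocks.isEmpty then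
    [workflow_label ++ ": missing step '" ++ REQUIRED_STEP ++ "'"]
  else
    let issues :=
      if !(blocks.any (fun block => block.any (fun line => PySem.Str.isIn REQUIRED_IF line))) then
        issues ++ [workflow_label ++ ": step '" ++ REQUIRED_STEP ++ "' missing expected condition"]
      else issues
    let issues := REQUIRED_TOKENS.foldl (fun issues token =>
      if !(blocks.any (fun block => block.any (fun line => PySem.Str.isIn token line))) then
        issues ++ [workflow_label ++ ": step '" ++ REQUIRED_STEP ++ "' missing expected token '" ++ token ++ "'"]
      else issues) issues
    issues

-- ===== PORT B =====
def pvScanStep (st : Bool × Bool × Bool × List Bool) (line : String) : Bool × Bool × Bool × List Bool :=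
  let found := st.1
  let in_block := st.2.1
  let has_if := st.2.2.1
  let tok_found := st.2.2.2
  let in_block := if PySem.Str.startswith (PySem.Str.lstrip line) "- name:" then
      (PySem.Str.strip line == ("- name: " ++ REQUIRED_STEP)) else in_block
  let found := if PySem.Str.startswith (PySem.Str.lstrip line) "- name:" then found || in_block else found
  if in_block then
    (found, in_block, has_if || PySem.Str.isIn REQUIRED_IF line,
      (tok_found.zip REQUIRED_TOKENS).map (fun ft => ft.1 || PySem.Str.isIn ft.2 line))
  else
    (found, in_block, has_if, tok_found)

def check_workflow_content_alt (content : String) (workflow_label : String) : List String :=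
  let lines := PySem.Str.splitlines content
  let st := lines.foldl pvScanStep (false, false, false, REQUIRED_TOKENS.map (fun _ => false))
  if !st.1 then
    [workflow_label ++ ": missing step '" ++ REQUIRED_STEP ++ "'"]
  else
    let issues : List String := if !st.2.2.1 then
        [workflow_label ++ ": step '" ++ REQUIRED_STEP ++ "' missing expected condition"] else []
    (st.2.2.2.zip REQUIRED_TOKENS).foldl (fun issues ft =>
      if !ft.1 then
        issues ++ [workflow_label ++ ": step '" ++ REQUIRED_STEP ++ "' missing expected token '" ++ ft.2 ++ "'"]
      else issues) issues

-- ===== PRECONDITION & SPEC =====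
def Spec_check_workflow_content (content : String) (workflow_label : String) (out : List String) : Prop := out = check_workflow_content_alt content workflow_label
instance (content : String) (workflow_label : String) (out : List String) : Decidable (Spec_check_workflow_content content workflow_label out) := by unfold Spec_check_workflow_content; infer_instance

-- ===== CLAIM (what is proved, stated in full; the proofs are below) =====
def Claim_equal_check_workflow_content : Prop := ∀ (content : String) (workflow_label : String), Dom_check_workflow_content content workflow_label → Spec_check_workflow_content content workflow_label (check_workflow_content content workflow_label)

-- ===== LEMMAS AND PROOFS =====

def pvIsName (l : String) : Bool := PySem.Str.startswith (PySem.Str.lstrip l) "- name:"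
def pvIsMatch (step : String) (l : String) : Bool := PySem.Str.strip l == ("- name: " ++ step)

lemma pvMatch_isName (step l : String) (h : pvIsMatch step l = true) : pvIsName l = true := by
  unfold pvIsMatch at h
  rw [beq_iff_eq] at h
  unfold pvIsName
  unfold PySem.Str.startswith PySem.Chars.startswith
  rw [List.isPrefixOf_iff_prefix, PySem.Str.toList_lstrip]
  have h2 : PySem.Chars.strip l.toList = "- name: ".toList ++ step.toList := by
    have := congrArg String.toList h
    simpa [PySem.Str.strip, String.toList_ofList, String.toList_append] using this
  unfold PySem.Chars.strip PySem.Chars.rstrip at h2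
  have hsuf : (List.dropWhile PySem.Chars.isspace (PySem.Chars.lstrip l.toList).reverse) <:+ (PySem.Chars.lstrip l.toList).reverse := List.dropWhile_suffix _
  have hpre : ("- name: ".toList ++ step.toList) <+: PySem.Chars.lstrip l.toList := by
    rw [← h2]
    have := List.reverse_prefix.mpr hsuf
    simpa using this
  have h0 : ("- name:".toList) <+: ("- name: ".toList ++ step.toList) := by
    refine List.IsPrefix.trans ?_ (List.prefix_append _ _)
    decide
  exact h0.trans hpre

def pvIdxs (Q : String → Bool) (s : Int) (ls : List String) : List Int :=
  ((PySem.List.enumerate ls s).filter (fun p => Q p.2)).map (fun p => p.1)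

lemma pvIdxs_cons (Q : String → Bool) (s : Int) (l : String) (ls : List String) :
    pvIdxs Q s (l :: ls) = (if Q l then [s] else []) ++ pvIdxs Q (s + 1) ls := by
  unfold pvIdxs
  rw [PySem.List.enumerate_cons]
  by_cases h : Q l <;> simp [h]

lemma pvIdxs_shift (Q : String → Bool) (s : Int) (ls : List String) :
    pvIdxs Q (s + 1) ls = (pvIdxs Q s ls).map (· + 1) := by
  induction ls generalizing s with
  | nil => simp [pvIdxs, PySem.List.enumerate]
  | cons l ls ih =>
    rw [pvIdxs_cons, pvIdxs_cons, ih, List.map_append]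
    by_cases h : Q l <;> simp [h]

lemma pvIdxs_lb (Q : String → Bool) (s : Int) (ls : List String) :
    ∀ i ∈ pvIdxs Q s ls, s ≤ i := by
  intro i hi
  unfold pvIdxs at hi
  simp only [List.mem_map, List.mem_filter] at hi
  obtain ⟨p, ⟨hp, _⟩, rfl⟩ := hi
  rw [PySem.List.mem_enumerate_iff] at hp
  obtain ⟨k, hk, rfl⟩ := hp
  simp only []
  omega


lemma pvTake_end (Q : String → Bool) : ∀ (ls : List String) (e : Int),
    e = (match pvIdxs Q 0 ls with | [] => (ls.length : Int) | v :: _ => v) →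
    ls.take e.toNat = ls.takeWhile (fun x => !Q x) := by
  intro ls
  induction ls with
  | nil => simp
  | cons l ls ih =>
    intro e he
    rw [pvIdxs_cons] at he
    by_cases h : Q l
    · simp [h] at he
      subst he; simp [List.takeWhile_cons, h]
    · simp only [h, if_neg, List.nil_append, Bool.false_eq_true, ite_false] at he
      rw [pvIdxs_shift] at he
      rcases hidx : pvIdxs Q 0 ls with _ | ⟨v, rest⟩
      · rw [hidx] at he; simp at he
        subst he
        have : ((ls.length : Int) + 1).toNat = ls.length + 1 := by omega
        have hih := ih ((ls.length : Int)) (by rw [hidx])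
        simp only [Int.toNat_natCast] at hih
        rw [this]
        simp [List.take_succ_cons, h, List.take_of_length_le]
        rw [← hih]
        simp [List.take_of_length_le]
      · rw [hidx] at he; simp at he
        subst he
        have hv : 0 ≤ v := pvIdxs_lb Q 0 ls v (by rw [hidx]; exact List.mem_cons_self ..)
        have : (v + 1).toNat = v.toNat + 1 := by omega
        rw [this]
        simp [List.takeWhile_cons, h]
        exact ih v (by rw [hidx])

def pvBlocksRec (step : String) : List String → List (List String)
  | [] => []
  | l :: ls =>
    if pvIsMatch step l then (l :: ls.takeWhile (fun x => !pvIsName x)) :: pvBlocksRec step ls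
    else pvBlocksRec step ls

def pvEnd (lines : List String) (idx : Int) : Int :=
  match (pvIdxs pvIsName 0 lines).filter (fun v => idx < v) with
  | [] => (lines.length : Int)
  | v :: _ => v

lemma pvStepBlocks_eq_map (step : String) (lines : List String) :
    pvStepBlocks lines step =
      (pvIdxs (pvIsMatch step) 0 lines).map (fun idx =>
        PySem.List.slice lines (some idx) (some (pvEnd lines idx))) := by
  have h := PySem.List.foldl_append_singleton_eq_map
      (fun idx => PySem.List.slice lines (some idx) (some (pvEnd lines idx)))
      (pvIdxs (pvIsMatch step) 0 lines) []
  simpa only [List.nil_append] using h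

lemma pvEnd_nonneg (ls : List String) (i : Int) : 0 ≤ pvEnd ls i := by
  unfold pvEnd
  rcases hf : (pvIdxs pvIsName 0 ls).filter (fun v => i < v) with _ | ⟨v, rest⟩
  · simp
  · have hv : v ∈ pvIdxs pvIsName 0 ls := by
      have : v ∈ (pvIdxs pvIsName 0 ls).filter (fun v => i < v) := by rw [hf]; exact List.mem_cons_self ..
      exact List.mem_of_mem_filter this
    simpa using pvIdxs_lb _ 0 ls v hv

lemma pvMatchLen (xs : List Int) (n : Int) :
    (match xs.map (· + 1) with | [] => n + 1 | v :: _ => v) =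
      (match xs with | [] => n | v :: _ => v) + 1 := by
  cases xs <;> simp

lemma pvFilter_map_succ (xs : List Int) (i : Int) :
    (xs.map (· + 1)).filter (fun v => i + 1 < v) = (xs.filter (fun v => i < v)).map (· + 1) := by
  rw [List.filter_map]
  congr 1
  apply List.filter_congr
  intro v _
  simp only [Function.comp, decide_eq_decide]
  omega

lemma pvEnd_shift (l : String) (ls : List String) (i : Int) (hi : 0 ≤ i) :
    pvEnd (l :: ls) (i + 1) = pvEnd ls i + 1 := by
  unfold pvEnd
  rw [pvIdxs_cons, pvIdxs_shift, List.filter_append, pvFilter_map_succ]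
  have h0 : List.filter (fun v => decide (i + 1 < v)) (if pvIsName l = true then [0] else []) = [] := by
    by_cases hN : pvIsName l
    · simp only [hN, if_pos]
      simp [show ¬(i + 1 < (0:Int)) by omega]
    · simp [hN]
  rw [h0, List.nil_append]
  have hlen : (((l :: ls).length : Int)) = ((ls.length : Int)) + 1 := by simp
  rw [hlen]
  exact pvMatchLen _ _

lemma pvSlice_shift (l : String) (ls : List String) (i e : Int) (hi : 0 ≤ i) (he : 0 ≤ e) :
    PySem.List.slice (l :: ls) (some (i + 1)) (some (e + 1)) = PySem.List.slice ls (some i) (some e) := by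
  rw [PySem.List.slice_toNat _ (by omega) (by omega), PySem.List.slice_toNat _ hi he]
  have h1 : (i + 1).toNat = i.toNat + 1 := by omega
  have h2 : (e + 1).toNat = e.toNat + 1 := by omega
  rw [h1, h2]
  simp [List.drop_succ_cons]

lemma pvEnd_zero_eq (l : String) (ls : List String) (hN : pvIsName l = true) :
    pvEnd (l :: ls) 0 =
      (match pvIdxs pvIsName 0 ls with | [] => (ls.length : Int) | v :: _ => v) + 1 := by
  unfold pvEnd
  rw [pvIdxs_cons, pvIdxs_shift]
  simp only [hN, if_pos, List.filter_append, List.filter_cons]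
  have h0 : ¬ ((0:Int) < 0) := by omega
  have hkeep : ((pvIdxs pvIsName 0 ls).map (· + 1)).filter (fun v => (0:Int) < v) =
      (pvIdxs pvIsName 0 ls).map (· + 1) := by
    apply List.filter_eq_self.mpr
    intro v hv
    simp only [List.mem_map] at hv
    obtain ⟨w, hw, rfl⟩ := hv
    have := pvIdxs_lb _ 0 ls w hw
    simp only [decide_eq_true_eq]
    omega
  simp only [h0, decide_eq_true_eq, if_neg, List.filter_nil, List.nil_append, hkeep]
  have hlen : (((l :: ls).length : Int)) = ((ls.length : Int)) + 1 := by simp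
  rw [hlen]
  exact pvMatchLen _ _

lemma pvBlocksRec_nil (step : String) : pvBlocksRec step [] = [] := rfl
lemma pvBlocksRec_cons (step : String) (l : String) (ls : List String) :
    pvBlocksRec step (l :: ls) =
      (if pvIsMatch step l then (l :: ls.takeWhile (fun x => !pvIsName x)) :: pvBlocksRec step ls
       else pvBlocksRec step ls) := rfl

set_option maxHeartbeats 1000000 in
lemma pvMap_bridge (step : String) : ∀ ls : List String,
    (pvIdxs (pvIsMatch step) 0 ls).map
        (fun idx => PySem.List.slice ls (some idx) (some (pvEnd ls idx))) = pvBlocksRec step ls := by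
  intro lines
  induction lines with
  | nil => simp [pvBlocksRec_nil, pvIdxs, PySem.List.enumerate_nil]
  | cons l ls ih =>
    rw [pvIdxs_cons, pvIdxs_shift, List.map_append, List.map_map]
    have htail : ((pvIdxs (pvIsMatch step) 0 ls).map
          ((fun idx => PySem.List.slice (l :: ls) (some idx) (some (pvEnd (l :: ls) idx))) ∘ (· + 1)))
        = (pvIdxs (pvIsMatch step) 0 ls).map
            (fun idx => PySem.List.slice ls (some idx) (some (pvEnd ls idx))) := by
      apply List.map_congr_left
      intro i hi
      have hi0 : 0 ≤ i := pvIdxs_lb _ 0 ls i hi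
      simp only [Function.comp]
      rw [pvEnd_shift l ls i hi0, pvSlice_shift l ls i _ hi0 (pvEnd_nonneg ls i)]
    rw [htail, ih, pvBlocksRec_cons]
    by_cases hM : pvIsMatch step l
    · have hN : pvIsName l = true := pvMatch_isName step l hM
      simp only [hM, if_pos, List.map_cons, List.map_nil, List.singleton_append]
      congr 1
      rw [pvEnd_zero_eq l ls hN]
      have hx0 : 0 ≤ (match pvIdxs pvIsName 0 ls with | [] => (ls.length : Int) | v :: _ => v) := by
        rcases hidx : pvIdxs pvIsName 0 ls with _ | ⟨v, rest⟩
        · simp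
        · have := pvIdxs_lb pvIsName 0 ls v (by rw [hidx]; exact List.mem_cons_self ..)
          simpa using this
      rw [PySem.List.slice_toNat _ (by omega) (by omega)]
      have h1 : ((match pvIdxs pvIsName 0 ls with | [] => (ls.length : Int) | v :: _ => v) + 1).toNat
          = (match pvIdxs pvIsName 0 ls with | [] => (ls.length : Int) | v :: _ => v).toNat + 1 := by
        omega
      rw [h1]
      simp only [Int.toNat_zero, Nat.sub_zero, List.drop_zero, List.take_succ_cons]
      congr 1
      exact pvTake_end pvIsName ls _ rfl
    · simp only [if_neg hM, List.map_nil, List.nil_append]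

lemma pvBlocks_bridge (step : String) (lines : List String) :
    pvStepBlocks lines step = pvBlocksRec step lines :=
  (pvStepBlocks_eq_map step lines).trans (pvMap_bridge step lines)

lemma pvBlocksRec_nil_iff (step : String) (ls : List String) :
    (pvBlocksRec step ls) = [] ↔ ls.any (pvIsMatch step) = false := by
  induction ls with
  | nil => simp [pvBlocksRec_nil]
  | cons l ls ih =>
    rw [pvBlocksRec_cons]
    by_cases h : pvIsMatch step l <;> simp [h, ih]

def pvG (p : String → Bool) (step : String) : Bool → List String → Bool
  | _, [] => false
  | inb, l :: ls =>
    ((if pvIsName l then pvIsMatch step l else inb) && p l) ||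
      pvG p step (if pvIsName l then pvIsMatch step l else inb) ls

lemma pvG_eq_blocks (p : String → Bool) (step : String) : ∀ (ls : List String) (inb : Bool),
    pvG p step inb ls =
      ((inb && (ls.takeWhile (fun x => !pvIsName x)).any p) ||
        (pvBlocksRec step ls).any (fun b => b.any p)) := by
  intro ls
  induction ls with
  | nil => intro inb; simp [pvG, pvBlocksRec_nil]
  | cons l ls ih =>
    intro inb
    rw [pvG, pvBlocksRec_cons]
    by_cases hN : pvIsName l
    · by_cases hM : pvIsMatch step l
      · simp only [hN, if_pos, hM, List.takeWhile_cons, Bool.not_true, hN, Bool.false_eq_true,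
          List.any_cons, ih true]
        cases p l <;> cases inb <;> simp [hN]
      · simp only [hN, if_pos, if_neg hM, List.takeWhile_cons, List.any_cons, ih false]
        simp [hM, hN, ih false]
    · have hM : pvIsMatch step l = false := by
        cases h : pvIsMatch step l
        · rfl
        · exact absurd (pvMatch_isName step l h) (by simp [hN])
      simp only [hN, Bool.false_eq_true, if_neg, ih inb, hM, List.takeWhile_cons, List.any_cons]
      simp [hN]
      cases inb <;> cases p l <;> simp [ih false, ih true, Bool.and_or_distrib_left, Bool.or_assoc]

lemma pvScan_spec : ∀ (ls : List String) (found inb hasIf b1 b2 : Bool),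
    ls.foldl pvScanStep (found, inb, hasIf, [b1, b2]) =
      (found || ls.any (pvIsMatch REQUIRED_STEP),
       ls.foldl (fun b l => if pvIsName l then pvIsMatch REQUIRED_STEP l else b) inb,
       hasIf || pvG (fun l => PySem.Str.isIn REQUIRED_IF l) REQUIRED_STEP inb ls,
       [b1 || pvG (fun l => PySem.Str.isIn "scripts/check_gh_cli_version.py" l) REQUIRED_STEP inb ls,
        b2 || pvG (fun l => PySem.Str.isIn "--min-version 2.50.0" l) REQUIRED_STEP inb ls]) := by
  intro ls
  induction ls with
  | nil => intro found inb hasIf b1 b2; simp [pvG]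
  | cons l ls ih =>
    intro found inb hasIf b1 b2
    have hN' : PySem.Str.startswith (PySem.Str.lstrip l) "- name:" = pvIsName l := rfl
    have hM' : (PySem.Str.strip l == ("- name: " ++ REQUIRED_STEP)) = pvIsMatch REQUIRED_STEP l := rfl
    rw [List.foldl_cons]
    by_cases hN : pvIsName l
    · by_cases hM : pvIsMatch REQUIRED_STEP l
      · simp only [pvScanStep, hN', hM', hN, hM, if_true, REQUIRED_TOKENS, List.zip_cons_cons,
          List.zip_nil_right, List.map_cons, List.map_nil, ih]
        simp [pvG, hN, hM, Bool.or_assoc]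
      · have hM2 : pvIsMatch REQUIRED_STEP l = false := by simpa using hM
        simp only [pvScanStep, hN', hM', hN, hM2, if_true, Bool.false_eq_true, if_false, ih]
        simp [pvG, hN, hM2]
    · have hN2 : pvIsName l = false := by simpa using hN
      have hM2 : pvIsMatch REQUIRED_STEP l = false := by
        cases h : pvIsMatch REQUIRED_STEP l
        · rfl
        · exact absurd (pvMatch_isName _ l h) (by simp [hN2])
      cases inb
      · simp only [pvScanStep, hN', hM', hN2, Bool.false_eq_true, if_false, ih]
        simp [pvG, hN2, hM2]
      · simp only [pvScanStep, hN', hM', hN2, Bool.false_eq_true, if_false, if_true,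
          REQUIRED_TOKENS, List.zip_cons_cons, List.zip_nil_right, List.map_cons, List.map_nil, ih]
        simp [pvG, hN2, hM2, Bool.or_assoc]

lemma pvPorts_eq (content workflow_label : String) :
    check_workflow_content content workflow_label = check_workflow_content_alt content workflow_label := by
  unfold check_workflow_content check_workflow_content_alt
  simp only []
  rw [show REQUIRED_TOKENS.map (fun _ : String => false) = [false, false] from rfl,
    pvScan_spec, pvBlocks_bridge]
  set lines := PySem.Str.splitlines content with hlines
  by_cases hAny : lines.any (pvIsMatch REQUIRED_STEP)
  · have hne : (pvBlocksRec REQUIRED_STEP lines).isEmpty = false := by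
      rw [List.isEmpty_eq_false_iff_exists_mem]
      rcases hblk : pvBlocksRec REQUIRED_STEP lines with _ | ⟨b, bs⟩
      · exact absurd ((pvBlocksRec_nil_iff _ _).mp hblk) (by simp [hAny])
      · exact ⟨b, List.mem_cons_self ..⟩
    simp only [hne, Bool.false_eq_true, if_false, Bool.false_or, hAny, Bool.not_true,
      pvG_eq_blocks, Bool.false_and, Bool.false_or]
    rfl
  · have hnil : pvBlocksRec REQUIRED_STEP lines = [] :=
      (pvBlocksRec_nil_iff _ _).mpr (by simpa using hAny)
    simp [hnil, hAny]

-- ===== VERDICT (by name: the statement is the Claim_ definition above) =====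
theorem check_workflow_content_spec : Claim_equal_check_workflow_content := by
  intro content workflow_label _
  exact pvPorts_eq content workflow_label
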